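-- pv_equiv track=rewrite | github.com/Relie28/ASVAB-SIM | test_formula_lab.py | _count_v_types
-- ===== SOURCE A (Python) =====
-- def _valid_var_syms(card: dict) -> list:
--     """
--     Returns the list of non-ambiguous var symbols for a card —
--     i.e. symbols that appear exactly once as a left-hand side across all var lines.
--     Matches the dedup logic in _flGenLevelQ.
--     """
--     counts = {}
--     for v in card.get('vars', []):
--         ei = str(v).find('=')
--         if ei >= 0:
--             s = v[:ei].strip()
--             counts[s] = counts.get(s, 0) + 1
--     return [s for s, n in counts.items() if n == 1]
--
-- def _count_v_types(card: dict) -> int: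
--     """Number of V_ questions the card can generate (mirrors Vs() filter logic)."""
--     vars_list = card.get('vars', [])
--     valid = _valid_var_syms(card)
--     count = 0
--     for sym in valid:
--         wrongs = [
--             v[v.find('=') + 1:].strip()
--             for v in vars_list
--             if '=' in v and v[:v.find('=')].strip() != sym
--         ]
--         if len(wrongs) >= 2:
--             count += 1
--     return count
-- ===== SOURCE B (Python) =====
-- def _count_v_types(card: dict) -> int:
--     """One pass: tally LHS symbols and count '=' lines; every unique symbol
--     yields total_eq-1 wrong alternatives, so valid symbols count iff total_eq >= 3."""
--     counts = {}
--     total_eq = 0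
--     for v in card.get('vars', []):
--         ei = str(v).find('=')
--         if ei >= 0:
--             total_eq += 1
--             s = v[:ei].strip()
--             counts[s] = counts.get(s, 0) + 1
--     if total_eq < 3:
--         return 0
--     return sum(1 for n in counts.values() if n == 1)
-- ===== Notes on version B (the rewrite author's own statement) =====
-- stated objective: alternative
-- what changed: Instead of rebuilding the full wrong-answer list for every valid symbol (a nested scan over vars), B makes one pass tallying LHS symbols and counting '='-lines, then returns the number of unique symbols if there are at least three '='-lines (each unique symbol has exactly total_eq-1 alternatives) and 0 otherwise.
import Mathlib
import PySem

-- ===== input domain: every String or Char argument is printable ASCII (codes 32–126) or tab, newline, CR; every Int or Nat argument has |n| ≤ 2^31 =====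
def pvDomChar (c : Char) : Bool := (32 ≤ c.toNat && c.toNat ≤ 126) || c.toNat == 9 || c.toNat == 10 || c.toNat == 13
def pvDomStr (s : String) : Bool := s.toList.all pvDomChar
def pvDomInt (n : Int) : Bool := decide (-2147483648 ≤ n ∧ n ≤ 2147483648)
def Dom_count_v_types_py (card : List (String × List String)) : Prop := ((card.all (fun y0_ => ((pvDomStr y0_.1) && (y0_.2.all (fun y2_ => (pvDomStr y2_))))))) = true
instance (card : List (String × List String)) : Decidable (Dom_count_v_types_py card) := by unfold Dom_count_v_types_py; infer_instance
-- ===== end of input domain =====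

-- B replaces A's per-symbol rebuild of the wrong-answer list with one tallying pass
-- (each unique LHS symbol has exactly total_eq - 1 alternatives), proved equal for all inputs.
-- ===== PORT A =====
def pvLhs (v : String) : String :=
  PySem.Str.strip (PySem.Str.slice v none (some (PySem.Str.find v "=")))

-- _valid_var_syms: tally each stripped LHS, keep the symbols appearing exactly once
def valid_var_syms (card : List (String × List String)) : List String :=
  let counts := (PySem.Dict.getD (PySem.Dict.mk card) "vars" []).foldl
    (fun (d : PySem.Dict String Int) v =>
      if PySem.Str.find v "=" ≥ 0 then d.insert (pvLhs v) (d.getD (pvLhs v) 0 + 1) else d)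
    PySem.Dict.empty
  (counts.items.filter (fun p => p.2 == 1)).map (·.1)

def count_v_types_py (card : List (String × List String)) : Int :=
  let vars_list := PySem.Dict.getD (PySem.Dict.mk card) "vars" []
  let valid := valid_var_syms card
  valid.foldl (fun count sym =>
    let wrongs := ((vars_list.filter
        (fun v => PySem.Str.isIn "=" v && !(pvLhs v == sym))).map
      (fun v => PySem.Str.strip (PySem.Str.slice v (some (PySem.Str.find v "=" + 1)) none)))
    if wrongs.length ≥ 2 then count + 1 else count) 0

-- ===== PORT B =====
def count_v_types_py_alt (card : List (String × List String)) : Int :=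
  let st := (PySem.Dict.getD (PySem.Dict.mk card) "vars" []).foldl
    (fun (st : PySem.Dict String Int × Int) v =>
      if PySem.Str.find v "=" ≥ 0 then
        (st.1.insert (pvLhs v) (st.1.getD (pvLhs v) 0 + 1), st.2 + 1)
      else st)
    (PySem.Dict.empty, 0)
  if st.2 < 3 then 0 else ((st.1.values.filter (fun n => n == 1)).length : Int)


-- ===== PRECONDITION & SPEC =====
def Spec_count_v_types_py (card : List (String × List String)) (out : Int) : Prop := out = count_v_types_py_alt card
instance (card : List (String × List String)) (out : Int) : Decidable (Spec_count_v_types_py card out) := by unfold Spec_count_v_types_py; infer_instance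

-- ===== CLAIM (what is proved, stated in full; the proofs are below) =====
def Claim_equal_count_v_types_py : Prop := ∀ (card : List (String × List String)), Dom_count_v_types_py card → Spec_count_v_types_py card (count_v_types_py card)

-- ===== LEMMAS AND PROOFS =====

-- ----- proof-only helpers -----
-- the lines of vars that contain '=' (as the ports test it), and their stripped LHSs
def eqFilter (l : List String) : List String :=
  l.filter (fun v => decide (PySem.Str.find v "=" ≥ 0))

def lhsList (l : List String) : List String := (eqFilter l).map pvLhs

-- the shared counting fold rewritten as an insert-loop over the LHS symbols
lemma cfold_eq (l : List String) (d : PySem.Dict String Int) :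
    l.foldl (fun (d : PySem.Dict String Int) v =>
      if PySem.Str.find v "=" ≥ 0 then d.insert (pvLhs v) (d.getD (pvLhs v) 0 + 1) else d) d
    = (lhsList l).foldl (fun d x => d.insert x (d.getD x 0 + 1)) d := by
  rw [PySem.List.foldl_ite_eq_foldl_filter
    (p := fun v => PySem.Str.find v "=" ≥ 0)
    (f := fun (d : PySem.Dict String Int) v => d.insert (pvLhs v) (d.getD (pvLhs v) 0 + 1))]
  rw [lhsList, List.foldl_map]
  rfl

lemma cfold_getD (l : List String) (s : String) :
    (l.foldl (fun (d : PySem.Dict String Int) v =>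
      if PySem.Str.find v "=" ≥ 0 then d.insert (pvLhs v) (d.getD (pvLhs v) 0 + 1) else d)
      PySem.Dict.empty).getD s 0 = ((lhsList l).count s : Int) := by
  rw [cfold_eq, PySem.Dict.getD_foldl_insert_add_one, PySem.Dict.getD_empty]
  ring

lemma cfold_nodup (l : List String) :
    (l.foldl (fun (d : PySem.Dict String Int) v =>
      if PySem.Str.find v "=" ≥ 0 then d.insert (pvLhs v) (d.getD (pvLhs v) 0 + 1) else d)
      PySem.Dict.empty).keys.Nodup := by
  rw [cfold_eq]
  exact PySem.Dict.nodup_keys_foldl_insert _ _ _ PySem.Dict.nodup_keys_empty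

-- '=' in v  ≡  v.find('=') >= 0
lemma isIn_eq_decide (v : String) :
    PySem.Str.isIn "=" v = decide (PySem.Str.find v "=" ≥ 0) := by
  by_cases h : ['='] <:+: v.toList
  · have h1 := (PySem.Chars.isIn_iff_infix ['='] v.toList).2 h
    have h2 := (PySem.Chars.find_nonneg_iff v.toList ['=']).2 h
    simp [ge_iff_le, h1, h2]
  · have h1 := (PySem.Chars.isIn_eq_false_iff ['='] v.toList).2 h
    have h2 : ¬ ((0 : Int) ≤ PySem.Chars.find v.toList ['=']) := fun hc =>
      h ((PySem.Chars.find_nonneg_iff v.toList ['=']).1 hc)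
    simp [ge_iff_le, h1, h2]

lemma countP_split {α : Type} (a b : α → Bool) (l : List α) :
    l.countP (fun v => a v && !b v) + l.countP (fun v => a v && b v) = l.countP a := by
  induction l with
  | nil => simp
  | cons x t ih =>
    simp only [List.countP_cons]
    cases ha : a x <;> cases hb : b x <;> simp <;> omega

-- length of A's per-symbol wrongs list
lemma wrongs_len (l : List String) (sym : String) :
    (l.filter (fun v => PySem.Str.isIn "=" v && !(pvLhs v == sym))).length
      = (eqFilter l).length - (lhsList l).count sym := by
  have hc : (lhsList l).count sym
      = l.countP (fun v => decide (PySem.Str.find v "=" ≥ 0) && (pvLhs v == sym)) := by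
    rw [lhsList, List.count_eq_countP, List.countP_map, eqFilter, List.countP_filter]
    apply List.countP_congr
    intro v _
    simp [Function.comp, Bool.and_comm]
  have he : (eqFilter l).length = l.countP (fun v => decide (PySem.Str.find v "=" ≥ 0)) := by
    rw [eqFilter, ← List.countP_eq_length_filter]
  have hw : (l.filter (fun v => PySem.Str.isIn "=" v && !(pvLhs v == sym))).length
      = l.countP (fun v => decide (PySem.Str.find v "=" ≥ 0) && !(pvLhs v == sym)) := by
    rw [← List.countP_eq_length_filter]
    apply List.countP_congr
    intro v _
    rw [isIn_eq_decide]
  rw [hw, hc, he]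
  have := countP_split (fun v => decide (PySem.Str.find v "=" ≥ 0)) (fun v => pvLhs v == sym) l
  omega

-- B's pair fold is the counting fold together with the '='-line count
lemma bfold_eq (l : List String) (d : PySem.Dict String Int) (n : Int) :
    l.foldl (fun (st : PySem.Dict String Int × Int) v =>
      if PySem.Str.find v "=" ≥ 0 then
        (st.1.insert (pvLhs v) (st.1.getD (pvLhs v) 0 + 1), st.2 + 1)
      else st) (d, n)
    = (l.foldl (fun (d : PySem.Dict String Int) v =>
        if PySem.Str.find v "=" ≥ 0 then d.insert (pvLhs v) (d.getD (pvLhs v) 0 + 1) else d) d,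
       n + ((eqFilter l).length : Int)) := by
  induction l generalizing d n with
  | nil => simp [eqFilter]
  | cons v t ih =>
    by_cases h : PySem.Str.find v "=" ≥ 0
    · simp only [List.foldl_cons, if_pos h, ih, eqFilter, List.filter_cons,
        decide_eq_true_eq, h, if_pos]
      rw [Prod.mk.injEq]
      refine ⟨rfl, ?_⟩
      simp only [List.length_cons]
      push_cast
      ring
    · simp only [List.foldl_cons, if_neg h, ih, eqFilter, List.filter_cons,
        decide_eq_true_eq, h, ite_false]

theorem count_v_types_py_spec : Claim_equal_count_v_types_py := by
  intro card _
  unfold Spec_count_v_types_py count_v_types_py count_v_types_py_alt valid_var_syms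
  set l := PySem.Dict.getD (PySem.Dict.mk card) "vars" [] with hl
  set D := l.foldl (fun (d : PySem.Dict String Int) v =>
      if PySem.Str.find v "=" ≥ 0 then d.insert (pvLhs v) (d.getD (pvLhs v) 0 + 1) else d)
      PySem.Dict.empty with hD
  set E := (eqFilter l).length with hE
  -- B reduces to a closed form
  rw [bfold_eq]
  simp only
  -- every valid symbol occurs exactly once among the LHSs
  have hmem : ∀ sym ∈ ((D.items.filter (fun p => p.2 == 1)).map (·.1)),
      (lhsList l).count sym = 1 := by
    intro sym hsym
    obtain ⟨p, hp, rfl⟩ := List.mem_map.1 hsym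
    have hpf := List.mem_filter.1 hp
    have h1 : p.2 = 1 := by simpa using hpf.2
    have hg : D.getD p.1 0 = p.2 := by
      obtain ⟨a, b⟩ := p
      exact PySem.Dict.getD_of_mem_items D hpf.1 (cfold_nodup l) 0
    have := cfold_getD l p.1
    rw [← hD] at this
    rw [hg, h1] at this
    exact_mod_cast this.symm
  -- A's loop body depends only on whether E ≥ 3
  have hA : ((D.items.filter (fun p => p.2 == 1)).map (·.1)).foldl
      (fun (count : Int) sym =>
        let wrongs := ((l.filter
            (fun v => PySem.Str.isIn "=" v && !(pvLhs v == sym))).map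
          (fun v => PySem.Str.strip (PySem.Str.slice v (some (PySem.Str.find v "=" + 1)) none)))
        if wrongs.length ≥ 2 then count + 1 else count) 0
      = ((D.items.filter (fun p => p.2 == 1)).map (·.1)).foldl
        (fun (count : Int) _ => if 3 ≤ E then count + 1 else count) 0 := by
    apply PySem.List.foldl_congr_mem
    intro acc sym hsym
    have hcnt := hmem sym hsym
    have hlen : ((l.filter (fun v => PySem.Str.isIn "=" v && !(pvLhs v == sym))).length)
        = E - 1 := by rw [wrongs_len, hcnt]
    simp only [List.length_map, ge_iff_le, hlen]
    have hE1 : 1 ≤ E := by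
      have := List.count_le_length (a := sym) (l := lhsList l)
      have hlen2 : (lhsList l).length = E := by rw [lhsList, List.length_map]
      omega
    have : (2 ≤ E - 1) ↔ (3 ≤ E) := by omega
    rw [if_congr this rfl rfl]
  rw [hA]
  -- lengths of the two "exactly once" collections agree
  have hvals : ((D.values.filter (fun n => n == 1)).length)
      = ((D.items.filter (fun p => p.2 == 1)).map (·.1)).length := by
    simp only [PySem.Dict.values, List.length_map]
    rw [← List.countP_eq_length_filter, ← List.countP_eq_length_filter, List.countP_map]
    rfl
  by_cases h3 : 3 ≤ E
  · have h3' : ¬ ((0 : Int) + (E : Int) < 3) := by push_cast; omega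
    rw [if_neg h3']
    have : (((D.items.filter (fun p => p.2 == 1)).map (·.1)).foldl
        (fun (count : Int) _ => if 3 ≤ E then count + 1 else count) 0)
        = (((D.items.filter (fun p => p.2 == 1)).map (·.1)).foldl
        (fun (count : Int) _ => count + 1) 0) := by
      apply PySem.List.foldl_congr_mem
      intro acc x _
      rw [if_pos h3]
    rw [this, PySem.List.foldl_add (g := fun _ => (1 : Int)), PySem.List.sum_map_const_int,
      hvals]
    ring
  · have h3' : ((0 : Int) + (E : Int) < 3) := by push_cast; omega
    rw [if_pos h3']
    have : (((D.items.filter (fun p => p.2 == 1)).map (·.1)).foldl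
        (fun (count : Int) _ => if 3 ≤ E then count + 1 else count) 0)
        = (((D.items.filter (fun p => p.2 == 1)).map (·.1)).foldl
        (fun (count : Int) _ => count) 0) := by
      apply PySem.List.foldl_congr_mem
      intro acc x _
      rw [if_neg h3]
    rw [this, PySem.List.foldl_ignore]

-- ===== VERDICT (by name: the statement is the Claim_ definition above) =====
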